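-- pv_equiv track=rewrite | github.com/samuelfraley-bse/computing-s | hw2/hw2_third_questions.py | country_with_most_cases
-- ===== SOURCE A (Python) =====
-- def total_registered_cases_per_country(data):
--     totals = {}
--     for country in data:
--         totals[country] = sum(data[country])
--     return totals
--
-- def country_with_most_cases(data):
--     totals = total_registered_cases_per_country(data)
--     max_country = None
--     max_cases = 0
--     for country, total in totals.items():
--         if total > max_cases:
--             max_cases = total
--             max_country = country
--     return max_country
-- ===== SOURCE B (Python) =====
-- def country_with_most_cases(data):
--     max_country = None
--     max_cases = 0
--     for country, cases in data.items():
--         total = sum(cases)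
--         if total > max_cases:
--             max_cases = total
--             max_country = country
--     return max_country
-- ===== Notes on version B (the rewrite author's own statement) =====
-- stated objective: simpler
-- what changed: Single streaming pass over data.items() with inline sum, replacing A's helper that builds an intermediate totals dict (with a lookup per key) followed by a second scanning pass; Pre_ excludes association lists with duplicate keys, which cannot arise from a Python dict and on which the assoc-list overwrite order is accidental.
import Mathlib
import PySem

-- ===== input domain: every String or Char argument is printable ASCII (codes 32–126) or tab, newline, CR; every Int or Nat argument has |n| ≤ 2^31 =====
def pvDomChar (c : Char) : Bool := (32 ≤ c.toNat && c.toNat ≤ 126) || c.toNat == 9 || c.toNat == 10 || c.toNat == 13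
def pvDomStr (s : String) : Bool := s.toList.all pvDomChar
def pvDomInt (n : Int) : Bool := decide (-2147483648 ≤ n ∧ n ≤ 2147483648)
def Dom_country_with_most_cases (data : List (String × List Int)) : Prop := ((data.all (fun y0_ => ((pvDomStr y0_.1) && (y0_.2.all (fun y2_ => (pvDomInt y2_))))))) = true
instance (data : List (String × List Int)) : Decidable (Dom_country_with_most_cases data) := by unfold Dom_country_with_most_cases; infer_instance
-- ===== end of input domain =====

-- B: one streaming pass over the items with the sum computed inline, instead of A's
-- helper building an intermediate totals dict and a second scanning pass (objective: simpler).


-- ===== PORT A =====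
-- totals = {}; for country in data: totals[country] = sum(data[country]); return totals
-- (data[country] is the dict lookup; the key is always present, so getD with default [] is exact)
def total_registered_cases_per_country (data : List (String × List Int)) : PySem.Dict String Int :=
  data.foldl (fun totals p =>
    totals.insert p.1 (((PySem.Dict.mk data).getD p.1 []).sum)) PySem.Dict.empty

def country_with_most_cases (data : List (String × List Int)) : Option String :=
  let totals := total_registered_cases_per_country data
  let r := totals.items.foldl
    (fun acc p => if p.2 > acc.2 then (some p.1, p.2) else acc)
    ((none : Option String), (0 : Int))
  r.1

-- ===== PORT B =====
def country_with_most_cases_alt (data : List (String × List Int)) : Option String :=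
  (data.foldl
    (fun acc p =>
      let total := p.2.sum
      if total > acc.2 then (some p.1, total) else acc)
    ((none : Option String), (0 : Int))).1

-- ===== PRECONDITION & SPEC =====
-- Pre_ excludes association lists with duplicate keys: the Python parameter is a dict, whose
-- keys are necessarily distinct, so such lists represent no Python input and the assoc-list
-- overwrite/lookup order on them is accidental.
def Pre_country_with_most_cases (data : List (String × List Int)) : Prop :=
  (data.map Prod.fst).Nodup
instance (data : List (String × List Int)) : Decidable (Pre_country_with_most_cases data) := by unfold Pre_country_with_most_cases; infer_instance

def pvWitness_country_with_most_cases : (List (String × List Int)) :=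
  [("US", [3, 4]), ("FR", [10])]

def Spec_country_with_most_cases (data : List (String × List Int)) (out : Option String) : Prop := out = country_with_most_cases_alt data
instance (data : List (String × List Int)) (out : Option String) : Decidable (Spec_country_with_most_cases data out) := by unfold Spec_country_with_most_cases; infer_instance

-- ===== CLAIM (what is proved, stated in full; the proofs are below) =====
def Claim_equal_country_with_most_cases : Prop := ∀ (data : List (String × List Int)), Dom_country_with_most_cases data → Pre_country_with_most_cases data → Spec_country_with_most_cases data (country_with_most_cases data)

-- ===== LEMMAS AND PROOFS =====

-- With distinct keys, the totals dict's items are exactly the input pairs with each list summed.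
theorem items_totals (data : List (String × List Int))
    (h : (data.map Prod.fst).Nodup) :
    (total_registered_cases_per_country data).items
      = data.map (fun p => (p.1, p.2.sum)) := by
  unfold total_registered_cases_per_country
  rw [PySem.Dict.items_foldl_insert_fresh data Prod.fst
      (fun p => ((PySem.Dict.mk data).getD p.1 []).sum) PySem.Dict.empty
      (by intro a _; exact PySem.Dict.contains_empty _) h]
  simp only [PySem.Dict.empty, List.nil_append]
  refine List.map_congr_left (fun p hp => ?_)
  have hget : (PySem.Dict.mk data).getD p.1 [] = p.2 :=
    PySem.Dict.getD_of_mem_items (d := PySem.Dict.mk data) (by simpa using hp) (by simpa using h) _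
  rw [hget]

theorem country_with_most_cases_spec' (data : List (String × List Int))
    (h : (data.map Prod.fst).Nodup) :
    country_with_most_cases data = country_with_most_cases_alt data := by
  show ((total_registered_cases_per_country data).items.foldl
      (fun acc p => if p.2 > acc.2 then (some p.1, p.2) else acc)
      ((none : Option String), (0 : Int))).1 = _
  rw [items_totals data h, List.foldl_map]
  rfl

-- ===== VERDICT (by name: the statement is the Claim_ definition above) =====
theorem country_with_most_cases_spec : Claim_equal_country_with_most_cases := by
  intro data _ hpre
  exact country_with_most_cases_spec' data hpre
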